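-- pv_equiv track=rewrite | github.com/21A91A05H3/GirusTechnologies_codinground | Knights and Portals/Problem_3.py | shortest_path_with_teleport
-- ===== SOURCE A (Python) =====
-- from collections import deque
--
-- def shortest_path_with_teleport(grid):
--     n, m = len(grid), len(grid[0])
--     if grid[0][0] != '.' or grid[n-1][m-1] != '.':
--         return -1
--     empty = [(i, j) for i in range(n) for j in range(m) if grid[i][j] == '.']
--     visited = [[[False, False] for _ in range(m)] for _ in range(n)]
--     queue = deque()
--     queue.append((0, 0, 0, False))
--     visited[0][0][0] = True
--     while queue:
--         x, y, steps, teleported = queue.popleft()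
--         if (x, y) == (n-1, m-1):
--             return steps
--         for dx, dy in [(-1,0),(1,0),(0,-1),(0,1)]:
--             nx, ny = x+dx, y+dy
--             if 0 <= nx < n and 0 <= ny < m and grid[nx][ny] == '.':
--                 if not visited[nx][ny][teleported]:
--                     visited[nx][ny][teleported] = True
--                     queue.append((nx, ny, steps+1, teleported))
--         if not teleported:
--             for ex, ey in empty:
--                 if (ex, ey) != (x, y) and not visited[ex][ey][1]:
--                     visited[ex][ey][1] = True
--                     queue.append((ex, ey, steps+1, True))
--     return -1
-- ===== SOURCE B (Python) =====
-- def shortest_path_with_teleport(grid):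
--     # The one free teleport makes any reachable problem trivial: if both corners
--     # are open, teleporting start -> end costs exactly 1 step (0 if they coincide).
--     n, m = len(grid), len(grid[0])
--     if grid[0][0] != '.' or grid[n-1][m-1] != '.':
--         return -1
--     return 0 if (n, m) == (1, 1) else 1
-- ===== Notes on version B (the rewrite author's own statement) =====
-- stated objective: simpler
-- what changed: Replaced the whole BFS-with-teleport search by a direct three-case corner check: with one free teleport the answer is always -1 (a blocked corner), 0 (1x1 grid) or 1 (teleport start->end).
import Mathlib
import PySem

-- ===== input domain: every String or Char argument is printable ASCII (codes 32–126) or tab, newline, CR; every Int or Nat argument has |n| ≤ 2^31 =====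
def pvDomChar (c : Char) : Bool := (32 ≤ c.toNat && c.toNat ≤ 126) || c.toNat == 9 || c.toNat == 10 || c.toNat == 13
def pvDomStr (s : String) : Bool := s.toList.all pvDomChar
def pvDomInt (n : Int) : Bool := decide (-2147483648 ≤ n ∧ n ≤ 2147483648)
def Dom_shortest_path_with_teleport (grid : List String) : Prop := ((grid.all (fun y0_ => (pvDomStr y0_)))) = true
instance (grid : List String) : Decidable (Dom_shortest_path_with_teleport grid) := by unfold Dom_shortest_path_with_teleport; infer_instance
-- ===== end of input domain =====

-- B replaces A's BFS by a direct three-case corner check: with one free teleport the answer is always -1, 0 (1x1 grid) or 1 (teleport start→end).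

-- ===== PORT A =====
-- grid[i][j] (both indices guarded or raise-free under Pre_); none = IndexError
def pvCell (grid : List String) (i j : Int) : Option Char :=
  (PySem.List.pyGet? grid i).bind (fun row => PySem.Str.pyGet? row j)

-- visited[i][j][t]; reads are only performed at in-range indices in the BFS (guarded), where this is exact
def pvVisGet (vis : List (List (Bool × Bool))) (i j : Int) (t : Bool) : Bool :=
  match (PySem.List.pyGet? vis i).bind (fun row => PySem.List.pyGet? row j) with
  | some p => if t then p.2 else p.1
  | none => false

-- visited[i][j][t] = True; only called with 0 ≤ i, 0 ≤ j (guarded in the BFS), where .toNat is exact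
def pvVisSet (vis : List (List (Bool × Bool))) (i j : Int) (t : Bool) : List (List (Bool × Bool)) :=
  vis.modify i.toNat (fun row => row.modify j.toNat (fun p => if t then (p.1, true) else (true, p.2)))

def pvDirs : List (Int × Int) := [(-1, 0), (1, 0), (0, -1), (0, 1)]

-- body of 'for dx, dy in [...]'
def pvNbrStep (grid : List String) (n m x y steps : Int) (tel : Bool)
    (s : List (List (Bool × Bool)) × List (Int × Int × Int × Bool)) (d : Int × Int) :
    List (List (Bool × Bool)) × List (Int × Int × Int × Bool) :=
  let nx := x + d.1
  let ny := y + d.2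
  if (0 ≤ nx ∧ nx < n ∧ 0 ≤ ny ∧ ny < m) ∧ pvCell grid nx ny = some '.' then
    if pvVisGet s.1 nx ny tel = false then
      (pvVisSet s.1 nx ny tel, s.2 ++ [(nx, ny, steps + 1, tel)])
    else s
  else s

-- body of 'for ex, ey in empty'
def pvTelStep (x y steps : Int)
    (s : List (List (Bool × Bool)) × List (Int × Int × Int × Bool)) (e : Int × Int) :
    List (List (Bool × Bool)) × List (Int × Int × Int × Bool) :=
  if ¬(e.1 = x ∧ e.2 = y) ∧ pvVisGet s.1 e.1 e.2 true = false then
    (pvVisSet s.1 e.1 e.2 true, s.2 ++ [(e.1, e.2, steps + 1, true)])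
  else s

-- 'while queue'; fuel bounds the number of dequeues (each enqueue flips a visited flag
-- from False to True, so ≤ 1 + 2*n*m entries ever enter the queue) and is never exhausted
def pvBfs (grid : List String) (n m : Int) (empty : List (Int × Int)) :
    Nat → List (Int × Int × Int × Bool) → List (List (Bool × Bool)) → Int
  | 0, _, _ => -1
  | _ + 1, [], _ => -1
  | f + 1, (x, y, steps, tel) :: rest, vis =>
    if x = n - 1 ∧ y = m - 1 then steps
    else
      let s1 := pvDirs.foldl (pvNbrStep grid n m x y steps tel) (vis, rest)
      let s2 := if tel = false then empty.foldl (pvTelStep x y steps) s1 else s1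
      pvBfs grid n m empty f s2.2 s2.1

def shortest_path_with_teleport (grid : List String) : Int :=
  let n : Int := grid.length
  let m : Int := ((PySem.List.pyGet? grid 0).getD "").length
  if ¬(pvCell grid 0 0 = some '.') ∨ ¬(pvCell grid (n - 1) (m - 1) = some '.') then -1
  else
    let empty : List (Int × Int) :=
      (PySem.List.pyRange 0 n 1).foldl (fun acc i =>
        (PySem.List.pyRange 0 m 1).foldl (fun acc2 j =>
          if pvCell grid i j = some '.' then acc2 ++ [(i, j)] else acc2) acc) []
    let vis0 := pvVisSet (List.replicate n.toNat (List.replicate m.toNat (false, false))) 0 0 false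
    pvBfs grid n m empty (empty.length + 2 * n.toNat * m.toNat + 4 + 1) [(0, 0, 0, false)] vis0

-- ===== PORT B =====
def shortest_path_with_teleport_alt (grid : List String) : Int :=
  let n : Int := grid.length
  let m : Int := ((PySem.List.pyGet? grid 0).getD "").length
  if ¬(pvCell grid 0 0 = some '.') ∨ ¬(pvCell grid (n - 1) (m - 1) = some '.') then -1
  else if n = 1 ∧ m = 1 then 0 else 1

-- ===== PRECONDITION & SPEC =====
-- Pre_ excludes exactly the inputs where Python A raises IndexError: empty grid, empty first
-- row, a last row shorter than the first (when grid[n-1][m-1] is evaluated), or any row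
-- shorter than the first once both corners are '.' and the cell comprehension runs.
def Pre_shortest_path_with_teleport (grid : List String) : Prop :=
  grid ≠ [] ∧ 0 < ((PySem.List.pyGet? grid 0).getD "").length ∧
  (pvCell grid 0 0 = some '.' →
    ((PySem.List.pyGet? grid 0).getD "").length ≤ ((grid.getLast?).getD "").length ∧
    (pvCell grid ((grid.length : Int) - 1)
        ((((PySem.List.pyGet? grid 0).getD "").length : Int) - 1) = some '.' →
      ∀ r ∈ grid, ((PySem.List.pyGet? grid 0).getD "").length ≤ r.length))
instance (grid : List String) : Decidable (Pre_shortest_path_with_teleport grid) := by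
  unfold Pre_shortest_path_with_teleport; infer_instance

def pvWitness_shortest_path_with_teleport : List String := [".."]

def Spec_shortest_path_with_teleport (grid : List String) (out : Int) : Prop := out = shortest_path_with_teleport_alt grid
instance (grid : List String) (out : Int) : Decidable (Spec_shortest_path_with_teleport grid out) := by unfold Spec_shortest_path_with_teleport; infer_instance

-- ===== CLAIM (what is proved, stated in full; the proofs are below) =====
def Claim_equal_shortest_path_with_teleport : Prop := ∀ (grid : List String), Dom_shortest_path_with_teleport grid → Pre_shortest_path_with_teleport grid → Spec_shortest_path_with_teleport grid (shortest_path_with_teleport grid)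

-- ===== LEMMAS AND PROOFS =====

-- a fold whose step only appends to the queue component splits as base-queue ++ delta
theorem pvFoldSplit {V E α : Type} (f : V × List α → E → V × List α)
    (hf : ∀ v q e, f (v, q) e = ((f (v, []) e).1, q ++ (f (v, []) e).2)) :
    ∀ (L : List E) (v : V) (q : List α),
      L.foldl f (v, q) = ((L.foldl f (v, [])).1, q ++ (L.foldl f (v, [])).2) := by
  intro L
  induction L with
  | nil => intro v q; simp
  | cons e L ih =>
    intro v q
    rcases h : f (v, []) e with ⟨v', d⟩
    simp only [List.foldl_cons]
    rw [hf v q e, h]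
    dsimp only
    rw [ih v' (q ++ d), ih v' d]
    simp [List.append_assoc]

theorem pvFoldMem {V E α : Type} (f : V × List α → E → V × List α) (P : α → Prop)
    (hf : ∀ v q e, (f (v, q) e).2 = q ∨ ∃ it, (f (v, q) e).2 = q ++ [it] ∧ P it) :
    ∀ (L : List E) (v : V) (q : List α) (a : α), a ∈ (L.foldl f (v, q)).2 → a ∈ q ∨ P a := by
  intro L
  induction L with
  | nil => intro v q a ha; exact Or.inl ha
  | cons e L ih =>
    intro v q a ha
    rcases h : f (v, q) e with ⟨v', q'⟩
    rw [List.foldl_cons, h] at ha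
    rcases ih v' q' a ha with hq | hp
    · rcases hf v q e with h2 | ⟨it, h2, hit⟩
      · rw [h] at h2; simp only at h2; rw [h2] at hq; exact Or.inl hq
      · rw [h] at h2; simp only at h2; rw [h2] at hq
        rcases List.mem_append.mp hq with h3 | h3
        · exact Or.inl h3
        · simp at h3; subst h3; exact Or.inr hit
    · exact Or.inr hp

theorem pvFoldLen {V E α : Type} (f : V × List α → E → V × List α)
    (hf : ∀ v q e, ((f (v, q) e).2).length ≤ q.length + 1) :
    ∀ (L : List E) (v : V) (q : List α), ((L.foldl f (v, q)).2).length ≤ q.length + L.length := by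
  intro L
  induction L with
  | nil => intro v q; simp
  | cons e L ih =>
    intro v q
    rcases h : f (v, q) e with ⟨v', q'⟩
    rw [List.foldl_cons, h]
    have h1 := ih v' q'
    have h2 := hf v q e
    rw [h] at h2
    simp only at h2
    simp only [List.length_cons]
    omega

theorem pvNbr_hf (grid : List String) (n m x y steps : Int) (tel : Bool) :
    ∀ v q e, pvNbrStep grid n m x y steps tel (v, q) e =
      ((pvNbrStep grid n m x y steps tel (v, []) e).1,
        q ++ (pvNbrStep grid n m x y steps tel (v, []) e).2) := by
  intro v q e
  unfold pvNbrStep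
  simp only
  split_ifs <;> simp

theorem pvTel_hf (x y steps : Int) :
    ∀ v q e, pvTelStep x y steps (v, q) e =
      ((pvTelStep x y steps (v, []) e).1, q ++ (pvTelStep x y steps (v, []) e).2) := by
  intro v q e
  unfold pvTelStep
  simp only
  split_ifs <;> simp

theorem pvVisGet_visSet_ne (v : List (List (Bool × Bool))) (a b c d : Int) (t t' : Bool)
    (ha : 0 ≤ a) (hb : 0 ≤ b) (hc : 0 ≤ c) (hd : 0 ≤ d)
    (hne : ¬(a = c ∧ b = d ∧ t = t')) :
    pvVisGet (pvVisSet v a b t) c d t' = pvVisGet v c d t' := by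
  unfold pvVisGet pvVisSet
  rw [PySem.List.pyGet?_of_nonneg _ hc, PySem.List.pyGet?_of_nonneg _ hc]
  rw [List.getElem?_modify]
  cases hrow : v[c.toNat]? with
  | none => rfl
  | some row =>
    simp only [Option.map_eq_map, Option.map_some, Option.bind_some]
    by_cases hac : a.toNat = c.toNat
    · rw [if_pos hac]
      rw [PySem.List.pyGet?_of_nonneg _ hd, PySem.List.pyGet?_of_nonneg _ hd]
      rw [List.getElem?_modify]
      cases hp : row[d.toNat]? with
      | none => rfl
      | some p =>
        simp only [Option.map_eq_map, Option.map_some]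
        by_cases hbd : b.toNat = d.toNat
        · rw [if_pos hbd]
          have htt : ¬ t = t' := fun h => hne ⟨by omega, by omega, h⟩
          cases t <;> cases t' <;> simp_all
        · rw [if_neg hbd]
    · rw [if_neg hac]

theorem pvVisGet_replicate (N M : Nat) (c d : Int) (t : Bool) :
    pvVisGet (List.replicate N (List.replicate M ((false : Bool), (false : Bool)))) c d t = false := by
  unfold pvVisGet
  cases h : PySem.List.pyGet? (List.replicate N (List.replicate M ((false : Bool), (false : Bool)))) c with
  | none => rfl
  | some row =>
    have hr := PySem.List.mem_of_pyGet?_eq_some _ h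
    rw [List.eq_of_mem_replicate hr]
    simp only [Option.bind_some]
    cases h2 : PySem.List.pyGet? (List.replicate M ((false : Bool), (false : Bool))) d with
    | none => rfl
    | some p =>
      have hp := PySem.List.mem_of_pyGet?_eq_some _ h2
      rw [List.eq_of_mem_replicate hp]
      cases t <;> rfl

-- the neighbour fold writes only the not-yet-teleported plane, so plane-1 reads are unchanged
theorem pvNbrFold_plane (grid : List String) (n m x y steps c d : Int) (hc : 0 ≤ c) (hd : 0 ≤ d) :
    ∀ (L : List (Int × Int)) (v : List (List (Bool × Bool))) (q : List (Int × Int × Int × Bool)),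
      pvVisGet ((L.foldl (pvNbrStep grid n m x y steps false) (v, q)).1) c d true =
        pvVisGet v c d true := by
  intro L
  induction L with
  | nil => intro v q; rfl
  | cons e L ih =>
    intro v q
    have hstep : pvVisGet ((pvNbrStep grid n m x y steps false (v, q) e).1) c d true =
        pvVisGet v c d true := by
      unfold pvNbrStep
      simp only
      split_ifs with h1 h2
      · exact pvVisGet_visSet_ne v _ _ c d false true (by exact h1.1.1) (by omega) hc hd (by simp)
      · rfl
      · rfl
    rcases hs : pvNbrStep grid n m x y steps false (v, q) e with ⟨v', q'⟩
    rw [hs] at hstep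
    simp only at hstep
    rw [List.foldl_cons, hs, ih v' q', hstep]

-- processing the empty-cell list enqueues the target cell (or it is already in the queue)
theorem pvTelFold_reach (x y steps tx ty : Int) (htx : 0 ≤ tx) (hty : 0 ≤ ty)
    (hne : ¬(tx = x ∧ ty = y)) :
    ∀ (L : List (Int × Int)) (v : List (List (Bool × Bool))) (q : List (Int × Int × Int × Bool)),
      (∀ p ∈ L, 0 ≤ p.1 ∧ 0 ≤ p.2) →
      (((tx, ty) ∈ L ∧ pvVisGet v tx ty true = false) ∨ (∃ a ∈ q, a.1 = tx ∧ a.2.1 = ty)) →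
      ∃ a ∈ (L.foldl (pvTelStep x y steps) (v, q)).2, a.1 = tx ∧ a.2.1 = ty := by
  intro L
  induction L with
  | nil =>
    intro v q _ h
    rcases h with ⟨h1, _⟩ | h2
    · simp at h1
    · exact h2
  | cons e L ih =>
    intro v q hb h
    rcases h with ⟨hmem, hvis⟩ | ⟨a, ha, hpa⟩
    · by_cases he : e = (tx, ty)
      · subst he
        have hcond : ¬((tx, ty).1 = x ∧ (tx, ty).2 = y) ∧
            pvVisGet v (tx, ty).1 (tx, ty).2 true = false := ⟨hne, hvis⟩
        rw [List.foldl_cons]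
        unfold pvTelStep
        rw [if_pos hcond]
        exact ih _ _ (fun p hp => hb p (List.mem_cons_of_mem _ hp))
          (Or.inr ⟨(tx, ty, steps + 1, true), by simp, rfl, rfl⟩)
      · have hmem' : (tx, ty) ∈ L := by
          rcases List.mem_cons.mp hmem with h | h
          · exact absurd h.symm he
          · exact h
        rw [List.foldl_cons]
        have hb0 := hb e (List.mem_cons_self)
        have hvis' : pvVisGet ((pvTelStep x y steps (v, q) e).1) tx ty true = false := by
          unfold pvTelStep
          simp only
          split_ifs with h1
          · rw [pvVisGet_visSet_ne v e.1 e.2 tx ty true true hb0.1 hb0.2 htx hty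
              (by intro hh; exact he (Prod.ext hh.1 hh.2.1))]
            exact hvis
          · exact hvis
        rcases hs : pvTelStep x y steps (v, q) e with ⟨v', q'⟩
        rw [hs] at hvis'
        simp only at hvis'
        exact ih v' q' (fun p hp => hb p (List.mem_cons_of_mem _ hp)) (Or.inl ⟨hmem', hvis'⟩)
    · rw [List.foldl_cons]
      rcases hs : pvTelStep x y steps (v, q) e with ⟨v', q'⟩
      have hq' : a ∈ q' := by
        have := pvTel_hf x y steps v q e
        rw [hs] at this
        have h2 : q' = q ++ (pvTelStep x y steps (v, []) e).2 := congrArg Prod.snd this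
        rw [h2]
        exact List.mem_append_left _ ha
      exact ih v' q' (fun p hp => hb p (List.mem_cons_of_mem _ hp)) (Or.inr ⟨a, hq', hpa⟩)

-- if the queue holds the end cell behind only non-end entries, the loop returns its steps value
theorem pvBfs_first_end (grid : List String) (n m : Int) (empty : List (Int × Int)) :
    ∀ (q1 : List (Int × Int × Int × Bool)) (s : Int) (t : Bool)
      (q2 : List (Int × Int × Int × Bool)) (vis : List (List (Bool × Bool))) (f : Nat),
      (∀ a ∈ q1, ¬(a.1 = n - 1 ∧ a.2.1 = m - 1)) → q1.length < f →
      pvBfs grid n m empty f (q1 ++ (n - 1, m - 1, s, t) :: q2) vis = s := by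
  intro q1
  induction q1 with
  | nil =>
    intro s t q2 vis f _ hf
    cases f with
    | zero => omega
    | succ f => simp [pvBfs]
  | cons a q1 ih =>
    intro s t q2 vis f hq hf
    cases f with
    | zero => simp at hf
    | succ f =>
      rcases a with ⟨ax, ay, asteps, atel⟩
      have hend := hq _ List.mem_cons_self
      simp only at hend
      rw [List.cons_append]
      simp only [pvBfs]
      rw [if_neg hend]
      rw [pvFoldSplit _ (pvNbr_hf grid n m ax ay asteps atel) pvDirs vis
        (q1 ++ (n - 1, m - 1, s, t) :: q2)]
      by_cases hat : atel = false
      · rw [if_pos hat]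
        rw [pvFoldSplit _ (pvTel_hf ax ay asteps) empty _ _]
        simp only [List.append_assoc, List.cons_append]
        exact ih s t _ _ f (fun b hb => hq b (List.mem_cons_of_mem _ hb))
          (by simp at hf ⊢; omega)
      · rw [if_neg hat]
        simp only [List.append_assoc, List.cons_append]
        exact ih s t _ _ f (fun b hb => hq b (List.mem_cons_of_mem _ hb))
          (by simp at hf ⊢; omega)

theorem pvFirstSplit {α : Type} (P : α → Prop) [DecidablePred P] :
    ∀ (l : List α), (∃ a ∈ l, P a) →
      ∃ l1 a l2, l = l1 ++ a :: l2 ∧ P a ∧ ∀ b ∈ l1, ¬ P b := by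
  intro l
  induction l with
  | nil => intro h; simp at h
  | cons x l ih =>
    intro h
    by_cases hx : P x
    · exact ⟨[], x, l, by simp, hx, by simp⟩
    · have h' : ∃ a ∈ l, P a := by
        rcases h with ⟨a, ha, hpa⟩
        rcases List.mem_cons.mp ha with h1 | h1
        · subst h1; exact absurd hpa hx
        · exact ⟨a, h1, hpa⟩
      rcases ih h' with ⟨l1, a, l2, heq, hpa, hl1⟩
      exact ⟨x :: l1, a, l2, by rw [heq]; rfl, hpa, by
        intro b hb
        rcases List.mem_cons.mp hb with h1 | h1
        · subst h1; exact hx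
        · exact hl1 b h1⟩

theorem pvEmpty_eq (grid : List String) (n m : Int) :
    (PySem.List.pyRange 0 n 1).foldl (fun acc i =>
      (PySem.List.pyRange 0 m 1).foldl (fun acc2 j =>
        if pvCell grid i j = some '.' then acc2 ++ [(i, j)] else acc2) acc) [] =
    (PySem.List.pyRange 0 n 1).flatMap (fun i =>
      ((PySem.List.pyRange 0 m 1).filter (fun j => decide (pvCell grid i j = some '.'))).map
        (fun j => ((i : Int), (j : Int)))) := by
  simp only [PySem.List.foldl_append_ite]
  rw [PySem.List.foldl_append_eq_flatMap]
  simp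

-- the BFS run when both corners are open and the grid is not 1×1: the start cell's teleport
-- step puts the end cell in the queue at distance 1, and it is dequeued before anything deeper
theorem pvRun_one (grid : List String) (n m : Int) (empty : List (Int × Int))
    (hn : 1 ≤ n) (hm : 1 ≤ m) (hnm : ¬(n = 1 ∧ m = 1))
    (hmem : (n - 1, m - 1) ∈ empty)
    (hbounds : ∀ p ∈ empty, 0 ≤ p.1 ∧ 0 ≤ p.2) :
    pvBfs grid n m empty (empty.length + 2 * n.toNat * m.toNat + 4 + 1) [(0, 0, 0, false)]
      (pvVisSet (List.replicate n.toNat (List.replicate m.toNat (false, false))) 0 0 false) = 1 := by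
  simp only [pvBfs]
  rw [if_neg (by omega : ¬((0 : Int) = n - 1 ∧ (0 : Int) = m - 1))]
  set vis0 := pvVisSet (List.replicate n.toNat (List.replicate m.toNat (false, false))) 0 0 false with hvis0
  rcases hs1 : pvDirs.foldl (pvNbrStep grid n m 0 0 0 false) (vis0, []) with ⟨V1, D1⟩
  simp only [if_pos trivial]
  rcases hs2 : empty.foldl (pvTelStep 0 0 0) (V1, D1) with ⟨V2, Q⟩
  simp only
  -- the end cell is in Q
  have hV1 : pvVisGet V1 (n - 1) (m - 1) true = false := by
    have h1 := pvNbrFold_plane grid n m 0 0 0 (n - 1) (m - 1) (by omega) (by omega) pvDirs vis0 []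
    rw [hs1] at h1
    simp only at h1
    rw [h1, hvis0]
    rw [pvVisGet_visSet_ne _ 0 0 (n - 1) (m - 1) false true (le_refl 0) (le_refl 0)
      (by omega) (by omega) (by simp)]
    exact pvVisGet_replicate _ _ _ _ _
  have hreach : ∃ a ∈ Q, a.1 = n - 1 ∧ a.2.1 = m - 1 := by
    have := pvTelFold_reach 0 0 0 (n - 1) (m - 1) (by omega) (by omega) (by omega)
      empty V1 D1 hbounds (Or.inl ⟨hmem, hV1⟩)
    rw [hs2] at this
    exact this
  -- every entry of Q has steps = 1
  have hsteps : ∀ a ∈ Q, a.2.2.1 = (1 : Int) := by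
    intro a ha
    have hQ : a ∈ (empty.foldl (pvTelStep 0 0 0) (V1, D1)).2 := by rw [hs2]; exact ha
    have h1 := pvFoldMem (pvTelStep 0 0 0) (fun b => b.2.2.1 = (1 : Int))
      (by
        intro v q e
        unfold pvTelStep
        simp only
        split_ifs
        · exact Or.inr ⟨(e.1, e.2, 1, true), rfl, rfl⟩
        · exact Or.inl rfl) empty V1 D1 a hQ
    rcases h1 with h1 | h1
    · -- a ∈ D1
      have hD1 : a ∈ (pvDirs.foldl (pvNbrStep grid n m 0 0 0 false) (vis0, [])).2 := by
        rw [hs1]; exact h1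
      have h2 := pvFoldMem (pvNbrStep grid n m 0 0 0 false) (fun b => b.2.2.1 = (1 : Int))
        (by
          intro v q e
          unfold pvNbrStep
          simp only
          split_ifs
          · exact Or.inr ⟨(0 + e.1, 0 + e.2, 1, false), rfl, rfl⟩
          · exact Or.inl rfl
          · exact Or.inl rfl) pvDirs vis0 [] a hD1
      rcases h2 with h2 | h2
      · simp at h2
      · exact h2
    · exact h1
  -- queue length bound
  have hlen : Q.length ≤ empty.length + 4 := by
    have h1 : D1.length ≤ 4 := by
      have := pvFoldLen (pvNbrStep grid n m 0 0 0 false)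
        (by
          intro v q e
          unfold pvNbrStep
          simp only
          split_ifs <;> simp) pvDirs vis0 []
      rw [hs1] at this
      simpa [pvDirs] using this
    have h2 := pvFoldLen (pvTelStep 0 0 0)
      (by
        intro v q e
        unfold pvTelStep
        simp only
        split_ifs <;> simp) empty V1 D1
    rw [hs2] at h2
    simp only at h2
    omega
  -- split at the first end entry and run the loop
  rcases pvFirstSplit (fun a : Int × Int × Int × Bool => a.1 = n - 1 ∧ a.2.1 = m - 1) Q hreach
    with ⟨l1, a, l2, hsplit, hpa, hl1⟩
  rcases a with ⟨a1, a2, a3, a4⟩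
  have ha1 : a1 = n - 1 := hpa.1
  have ha2 : a2 = m - 1 := hpa.2
  have ha3 : a3 = 1 := hsteps _ (by rw [hsplit]; exact List.mem_append_right _ List.mem_cons_self)
  subst ha1; subst ha2; subst ha3
  rw [hsplit]
  refine pvBfs_first_end grid n m empty l1 1 a4 l2 V2 _ hl1 ?_
  have : l1.length < Q.length := by rw [hsplit]; simp
  omega

theorem pvCell_zero_facts (grid : List String) (h : pvCell grid 0 0 = some '.') :
    1 ≤ (grid.length : Int) ∧ 1 ≤ (((PySem.List.pyGet? grid 0).getD "").length : Int) := by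
  unfold pvCell at h
  cases hr : PySem.List.pyGet? grid 0 with
  | none => rw [hr] at h; simp at h
  | some row =>
    rw [hr] at h
    simp only [Option.bind_some] at h
    constructor
    · have hmem := PySem.List.mem_of_pyGet?_eq_some _ hr
      have hne : grid ≠ [] := by intro hh; subst hh; simp at hmem
      have := List.length_pos_of_ne_nil hne
      omega
    · simp only [Option.getD_some]
      have h2 : PySem.Str.pyGet? row (((0 : Nat) : Int)) = some '.' := h
      rw [PySem.Str.pyGet?_natCast] at h2
      obtain ⟨h3, -⟩ := List.getElem?_eq_some_iff.mp h2
      have h5 : row.toList.length = row.length := String.length_toList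
      omega

theorem pvAB (grid : List String) :
    shortest_path_with_teleport grid = shortest_path_with_teleport_alt grid := by
  unfold shortest_path_with_teleport shortest_path_with_teleport_alt
  simp only
  by_cases hg : ¬(pvCell grid 0 0 = some '.') ∨
      ¬(pvCell grid ((grid.length : Int) - 1)
          ((((PySem.List.pyGet? grid 0).getD "").length : Int) - 1) = some '.')
  · rw [if_pos hg, if_pos hg]
  · rw [if_neg hg, if_neg hg]
    push Not at hg
    obtain ⟨h00, hend⟩ := hg
    obtain ⟨hn, hm⟩ := pvCell_zero_facts grid h00
    set n : Int := (grid.length : Int) with hndef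
    set m : Int := (((PySem.List.pyGet? grid 0).getD "").length : Int) with hmdef
    by_cases hnm : n = 1 ∧ m = 1
    · rw [if_pos hnm]
      simp only [pvBfs]
      rw [if_pos (by omega : (0 : Int) = n - 1 ∧ (0 : Int) = m - 1)]
    · rw [if_neg hnm]
      rw [pvEmpty_eq grid n m]
      apply pvRun_one grid n m _ hn hm hnm
      · simp only [List.mem_flatMap, List.mem_map, List.mem_filter,
          PySem.List.mem_pyRange_one]
        exact ⟨n - 1, ⟨by omega, by omega⟩, m - 1,
          ⟨⟨by omega, by omega⟩, by simpa using hend⟩, rfl⟩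
      · intro p hp
        simp only [List.mem_flatMap, List.mem_map, List.mem_filter,
          PySem.List.mem_pyRange_one] at hp
        rcases hp with ⟨i, ⟨hi0, _⟩, j, ⟨⟨hj0, _⟩, _⟩, hpe⟩
        rw [← hpe]
        exact ⟨hi0, hj0⟩

-- ===== VERDICT (by name: the statement is the Claim_ definition above) =====
theorem shortest_path_with_teleport_spec : Claim_equal_shortest_path_with_teleport := by
  intro grid _ _
  unfold Spec_shortest_path_with_teleport
  exact pvAB grid
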